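-- pv_equiv track=rewrite | github.com/Raj-9747/erp-gst | app.py | _pick_amount_col_erp
-- ===== SOURCE A (Python) =====
-- from typing import List, Optional, Tuple
--
-- def _pick_amount_col_erp(cols: List[str]) -> str:
--     pref_order = [
--         lambda c: "marg" in c and "taxable" in c,
--         lambda c: "taxable value" in c,
--         lambda c: "taxable" in c,
--     ]
--     for pred in pref_order:
--         hits = [c for c in cols if pred(c.lower())]
--         if hits:
--             return hits[0]
--     raise ValueError("ERP amount column not found.")
-- ===== SOURCE B (Python) =====
-- def _rank(cl):
--     if "marg" in cl and "taxable" in cl: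
--         return 0
--     if "taxable value" in cl:
--         return 1
--     if "taxable" in cl:
--         return 2
--     return 3
--
--
-- def _pick_amount_col_erp(cols):
--     best = None
--     best_r = 3
--     for c in cols:
--         r = _rank(c.lower())
--         if r < best_r:
--             best, best_r = c, r
--     if best is None:
--         raise ValueError("ERP amount column not found.")
--     return best
-- ===== Notes on version B (the rewrite author's own statement) =====
-- stated objective: simpler
-- what changed: Replaces A's three filtering passes (one per predicate, each building a hit list) by a single pass that tracks the column with the minimum predicate rank, with strict-less updates preserving the first-in-order tiebreak.
import Mathlib
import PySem

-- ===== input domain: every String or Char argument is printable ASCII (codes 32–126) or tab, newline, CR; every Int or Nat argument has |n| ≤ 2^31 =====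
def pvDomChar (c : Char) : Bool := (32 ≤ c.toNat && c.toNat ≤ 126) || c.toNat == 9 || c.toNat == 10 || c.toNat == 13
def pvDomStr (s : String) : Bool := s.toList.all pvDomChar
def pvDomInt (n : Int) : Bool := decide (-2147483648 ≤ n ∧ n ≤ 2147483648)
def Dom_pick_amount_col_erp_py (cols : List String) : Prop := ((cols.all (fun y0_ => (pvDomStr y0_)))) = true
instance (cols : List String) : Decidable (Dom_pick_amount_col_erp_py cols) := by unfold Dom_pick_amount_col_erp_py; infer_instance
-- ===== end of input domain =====

-- B replaces A's three filtering passes by one min-rank pass (simpler, no intermediate lists); return value only.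

-- ===== PORT A =====
-- the three predicates of pref_order (applied to the lowercased column)
def pvP0 (c : String) : Bool := PySem.Str.isIn "marg" c && PySem.Str.isIn "taxable" c
def pvP1 (c : String) : Bool := PySem.Str.isIn "taxable value" c
def pvP2 (c : String) : Bool := PySem.Str.isIn "taxable" c

def pvPredsA : List (String → Bool) := [pvP0, pvP1, pvP2]

-- 'for pred in pref_order: hits = [c for c in cols if pred(c.lower())]; if hits: return hits[0]'
def pvGoA : List (String → Bool) → List String → Option String
  | [], _ => none
  | p :: ps, cols =>
    match cols.filter (fun c => p (PySem.Str.lower c)) with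
    | h :: _ => some h
    | [] => pvGoA ps cols

def pick_amount_col_erp_py (cols : List String) : String :=
  (pvGoA pvPredsA cols).getD ""   -- none = the ValueError raise, excluded by Pre_

-- ===== PORT B =====
-- rank of an already-lowercased column: index of the first matching predicate, 3 = none
def pvRank (cl : String) : Nat :=
  if pvP0 cl then 0
  else if pvP1 cl then 1
  else if pvP2 cl then 2
  else 3

-- the one step of B's loop body
def pvStep (b : Option String × Nat) (c : String) : Option String × Nat :=
  if pvRank (PySem.Str.lower c) < b.2 then (some c, pvRank (PySem.Str.lower c)) else b

def pick_amount_col_erp_py_alt (cols : List String) : String :=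
  match (cols.foldl pvStep (none, 3)).1 with
  | some c => c
  | none => ""   -- best is None = the ValueError raise, excluded by Pre_

-- ===== PRECONDITION & SPEC =====
-- Pre_ excludes exactly the inputs where A raises ValueError: no column contains "taxable" (lowercased).
def Pre_pick_amount_col_erp_py (cols : List String) : Prop :=
  ∃ c ∈ cols, PySem.Str.isIn "taxable" (PySem.Str.lower c) = true
instance (cols : List String) : Decidable (Pre_pick_amount_col_erp_py cols) := by
  unfold Pre_pick_amount_col_erp_py; infer_instance

def pvWitness_pick_amount_col_erp_py : List String := ["Taxable Value"]

def Spec_pick_amount_col_erp_py (cols : List String) (out : String) : Prop :=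
  out = pick_amount_col_erp_py_alt cols
instance (cols : List String) (out : String) : Decidable (Spec_pick_amount_col_erp_py cols out) := by
  unfold Spec_pick_amount_col_erp_py; infer_instance

-- ===== CLAIM (what is proved, stated in full; the proofs are below) =====
def Claim_equal_pick_amount_col_erp_py : Prop :=
  ∀ (cols : List String), Dom_pick_amount_col_erp_py cols →
    Pre_pick_amount_col_erp_py cols →
    Spec_pick_amount_col_erp_py cols (pick_amount_col_erp_py cols)

-- ===== LEMMAS AND PROOFS =====

theorem foldl_no_update (cs : List String) (b : Option String × Nat)
    (h : ∀ c ∈ cs, ¬ pvRank (PySem.Str.lower c) < b.2) :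
    cs.foldl pvStep b = b := by
  induction cs with
  | nil => rfl
  | cons c cs ih =>
    have hc := h c (by simp)
    simp only [List.foldl_cons, pvStep, if_neg hc]
    exact ih (fun d hd => h d (by simp [hd]))

theorem foldl_first (cs : List String) (k : Nat) (b : Option String × Nat)
    (hk : k < b.2)
    (hlo : ∀ c ∈ cs, k ≤ pvRank (PySem.Str.lower c)) :
    ∀ h t, cs.filter (fun c => pvRank (PySem.Str.lower c) == k) = h :: t →
      (cs.foldl pvStep b).1 = some h := by
  induction cs generalizing b with
  | nil => intro h t habs; simp at habs
  | cons c cs ih =>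
    intro h t hfil
    by_cases hc : pvRank (PySem.Str.lower c) = k
    · rw [List.filter_cons_of_pos (by simp [hc])] at hfil
      simp only [List.cons.injEq] at hfil
      obtain ⟨rfl, -⟩ := hfil
      simp only [List.foldl_cons, pvStep, hc, if_pos hk]
      rw [foldl_no_update cs (some c, k)
        (fun d hd => by simpa using hlo d (by simp [hd]))]
    · rw [List.filter_cons_of_neg (by simp [hc])] at hfil
      have hklt : k < pvRank (PySem.Str.lower c) :=
        lt_of_le_of_ne (hlo c (by simp)) (fun e => hc e.symm)
      simp only [List.foldl_cons, pvStep]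
      split
      · exact ih (some c, pvRank (PySem.Str.lower c)) hklt
          (fun d hd => hlo d (by simp [hd])) h t hfil
      · exact ih b hk (fun d hd => hlo d (by simp [hd])) h t hfil

-- rank characterisations
theorem pvRank_eq0 (x : String) : (pvRank x == 0) = pvP0 x := by
  unfold pvRank; split_ifs <;> simp_all

theorem pvRank_eq1 (x : String) (h0 : ¬ pvP0 x = true) : (pvRank x == 1) = pvP1 x := by
  unfold pvRank; split_ifs <;> simp_all

theorem pvRank_eq2 (x : String) (h0 : ¬ pvP0 x = true) (h1 : ¬ pvP1 x = true) :
    (pvRank x == 2) = pvP2 x := by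
  unfold pvRank; split_ifs <;> simp_all

theorem pvRank_ge1 (x : String) (h0 : ¬ pvP0 x = true) : 1 ≤ pvRank x := by
  unfold pvRank; split_ifs <;> omega

theorem pvRank_ge2 (x : String) (h0 : ¬ pvP0 x = true) (h1 : ¬ pvP1 x = true) : 2 ≤ pvRank x := by
  unfold pvRank; split_ifs <;> omega

theorem goA_expand (cols : List String) :
    pick_amount_col_erp_py cols =
      ((match cols.filter (fun c => pvP0 (PySem.Str.lower c)) with
        | h :: _ => some h
        | [] =>
          match cols.filter (fun c => pvP1 (PySem.Str.lower c)) with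
          | h :: _ => some h
          | [] =>
            match cols.filter (fun c => pvP2 (PySem.Str.lower c)) with
            | h :: _ => some h
            | [] => (none : Option String)).getD "") := rfl

-- ===== VERDICT (by name: the statement is the Claim_ definition above) =====
theorem pick_amount_col_erp_py_spec : Claim_equal_pick_amount_col_erp_py := by
  intro cols _ hpre
  unfold Spec_pick_amount_col_erp_py pick_amount_col_erp_py_alt
  rw [goA_expand]
  rcases hf0 : cols.filter (fun c => pvP0 (PySem.Str.lower c)) with _ | ⟨h, t⟩
  · have hall0 : ∀ c ∈ cols, ¬ pvP0 (PySem.Str.lower c) = true := by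
      intro c hc; simpa using List.filter_eq_nil_iff.mp hf0 c hc
    rcases hf1 : cols.filter (fun c => pvP1 (PySem.Str.lower c)) with _ | ⟨h, t⟩
    · have hall1 : ∀ c ∈ cols, ¬ pvP1 (PySem.Str.lower c) = true := by
        intro c hc; simpa using List.filter_eq_nil_iff.mp hf1 c hc
      rcases hf2 : cols.filter (fun c => pvP2 (PySem.Str.lower c)) with _ | ⟨h, t⟩
      · exfalso
        obtain ⟨c, hc, htx⟩ := hpre
        have := List.filter_eq_nil_iff.mp hf2 c hc
        simp [pvP2] at this
        exact absurd htx (by simpa using this)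
      · have := foldl_first cols 2 (none, 3) (by norm_num)
          (fun c hc => pvRank_ge2 _ (hall0 c hc) (hall1 c hc)) h t
          (by rw [List.filter_congr (fun c hc =>
                pvRank_eq2 _ (hall0 c hc) (hall1 c hc))]; exact hf2)
        rw [this]; rfl
    · have := foldl_first cols 1 (none, 3) (by norm_num)
        (fun c hc => pvRank_ge1 _ (hall0 c hc)) h t
        (by rw [List.filter_congr (fun c hc => pvRank_eq1 _ (hall0 c hc))]; exact hf1)
      rw [this]; rfl
  · have := foldl_first cols 0 (none, 3) (by norm_num)
      (fun c _ => Nat.zero_le _) h t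
      (by rw [List.filter_congr (fun c _ => pvRank_eq0 _)]; exact hf0)
    rw [this]; rfl
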